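-- pv_equiv track=rewrite | github.com/SaiRanaTS/Project_DS | 1_Data_Downlink.py | ls_to_dic
-- ===== SOURCE A (Python) =====
-- def ls_to_dic(receivedata, port_gps_info):
--     num_port = len(receivedata)
--     num_port_name = len(port_gps_info)
--     result = dict()
--     for i in range(0, num_port, num_port_name):
--         for key, val in zip(port_gps_info, receivedata[i:i + num_port_name]):
--             if key not in result:
--                 result[key] = []
--             result[key].append(val)
--     return result
-- ===== SOURCE B (Python) =====
-- def ls_to_dic(receivedata, port_gps_info):
--     # Two staged passes instead of A's nested chunk loop: the keys that will occur
--     # are exactly the first len(receivedata) port names (first-occurrence order),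
--     # so preallocate the groups, then fill them in one flat pass by modular indexing.
--     n = len(port_gps_info)
--     keys = dict.fromkeys(port_gps_info[:len(receivedata)])
--     result = {k: [] for k in keys}
--     for i, v in enumerate(receivedata):
--         result[port_gps_info[i % n]].append(v)
--     return result
-- ===== Notes on version B (the rewrite author's own statement) =====
-- stated objective: alternative
-- what changed: Replaces A's nested chunk loop (range with step + per-chunk zip/slice growing a dict as keys appear) by two staged passes: dedup the first len(receivedata) port names to preallocate the groups, then fill them in one flat pass with modular indexing.
import Mathlib
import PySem

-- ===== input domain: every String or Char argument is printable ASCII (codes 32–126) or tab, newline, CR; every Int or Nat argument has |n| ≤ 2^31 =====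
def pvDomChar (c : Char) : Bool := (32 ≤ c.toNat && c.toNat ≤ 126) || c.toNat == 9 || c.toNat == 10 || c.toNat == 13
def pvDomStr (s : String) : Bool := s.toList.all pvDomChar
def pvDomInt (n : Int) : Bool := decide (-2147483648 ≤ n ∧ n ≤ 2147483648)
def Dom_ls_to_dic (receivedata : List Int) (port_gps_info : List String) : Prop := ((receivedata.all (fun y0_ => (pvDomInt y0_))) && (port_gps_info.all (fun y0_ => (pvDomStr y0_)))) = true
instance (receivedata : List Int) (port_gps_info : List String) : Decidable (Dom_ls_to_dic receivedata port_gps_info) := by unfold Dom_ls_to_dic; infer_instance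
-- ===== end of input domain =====

-- B groups the data in two staged passes (dedup the first len(receivedata) port names to
-- preallocate the groups, then fill them in one flat pass by modular indexing) instead of A's
-- nested chunk loop; same return value on non-empty port_gps_info (alternative, not faster).

-- ===== PORT A =====
def ls_to_dic (receivedata : List Int) (port_gps_info : List String) : List (String × List Int) :=
  let num_port : Int := PySem.List.len receivedata
  let num_port_name : Int := PySem.List.len port_gps_info
  let result : PySem.Dict String (List Int) := PySem.Dict.empty
  let result := (PySem.List.pyRange 0 num_port num_port_name).foldl
    (fun result i =>
      (List.zip port_gps_info
          (PySem.List.slice receivedata (some i) (some (i + num_port_name)))).foldl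
        (fun result kv =>
          let result := if result.contains kv.1 then result else result.insert kv.1 []
          result.modify kv.1 [] (fun l => l ++ [kv.2]))
        result)
    result
  result.items

-- ===== PORT B =====
def ls_to_dic_alt (receivedata : List Int) (port_gps_info : List String) : List (String × List Int) :=
  let n : Int := PySem.List.len port_gps_info
  let keys : List String :=
    PySem.List.dedup (PySem.List.slice port_gps_info none (some (PySem.List.len receivedata)))
  let result : PySem.Dict String (List Int) :=
    keys.foldl (fun d k => d.insert k []) PySem.Dict.empty
  -- result[key].append(v): the key is always one of `keys`, so Python's d[k].append(v) is this in-place modify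
  let result := (PySem.List.enumerate receivedata).foldl
    (fun d p =>
      d.modify (PySem.List.pyGetD port_gps_info (PySem.Int.mod p.1 n) "") []
        (fun l => l ++ [p.2]))
    result
  result.items

-- ===== PRECONDITION & SPEC =====
-- Pre_ excludes empty port_gps_info, on which Python A raises ValueError (range step 0).
def Pre_ls_to_dic (receivedata : List Int) (port_gps_info : List String) : Prop :=
  port_gps_info ≠ []
instance (receivedata : List Int) (port_gps_info : List String) : Decidable (Pre_ls_to_dic receivedata port_gps_info) := by unfold Pre_ls_to_dic; infer_instance

def pvWitness_ls_to_dic : List Int × List String := ([1, 2, 3, 4, 5], ["a", "b"])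

def Spec_ls_to_dic (receivedata : List Int) (port_gps_info : List String) (out : List (String × List Int)) : Prop := out = ls_to_dic_alt receivedata port_gps_info
instance (receivedata : List Int) (port_gps_info : List String) (out : List (String × List Int)) : Decidable (Spec_ls_to_dic receivedata port_gps_info out) := by unfold Spec_ls_to_dic; infer_instance

-- ===== CLAIM (what is proved, stated in full; the proofs are below) =====
def Claim_equal_ls_to_dic : Prop := ∀ (receivedata : List Int) (port_gps_info : List String), Dom_ls_to_dic receivedata port_gps_info → Pre_ls_to_dic receivedata port_gps_info → Spec_ls_to_dic receivedata port_gps_info (ls_to_dic receivedata port_gps_info)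

-- ===== LEMMAS AND PROOFS =====

-- The dict-mutating body of A's inner loop, as a step function on (key, value) pairs.
def lsStep (d : PySem.Dict String (List Int)) (kv : String × Int) : PySem.Dict String (List Int) :=
  let d' := if d.contains kv.1 then d else d.insert kv.1 []
  d'.modify kv.1 [] (fun l => l ++ [kv.2])

-- The flat (key, value) sequence both programs traverse, keyed by modular indexing.
def lsPairs (receivedata : List Int) (port_gps_info : List String) : List (String × Int) :=
  (List.range receivedata.length).map
    (fun j => (port_gps_info.getD (j % port_gps_info.length) "", receivedata.getD j 0))

-- Group-by presentation of the result: distinct keys in first-occurrence order, filtered values.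
def lsGrouped (ps : List (String × Int)) : List (String × List Int) :=
  (PySem.Set.ofList (ps.map Prod.fst)).map
    (fun k => (k, (ps.filter (fun p => p.1 == k)).map Prod.snd))

lemma lsRange_cons (m n : Int) (hm : 0 < m) (hn : 0 < n) :
    PySem.List.pyRange 0 m n = 0 :: (PySem.List.pyRange 0 (m - n) n).map (fun i => n + i) := by
  rw [PySem.List.pyRange_of_pos _ _ hn, PySem.List.pyRange_of_pos _ _ hn]
  have hc : (if (0:Int) < m then ((m - 0 + n - 1) / n).toNat else 0)
      = (if (0:Int) < m - n then ((m - n - 0 + n - 1) / n).toNat else 0) + 1 := by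
    rw [if_pos hm]
    have h1 : (m - 0 + n - 1) = (m - 1) + 1 * n := by ring
    rw [h1, Int.add_mul_ediv_right _ _ (by omega : n ≠ 0)]
    by_cases h : (0:Int) < m - n
    · rw [if_pos h]
      have h2 : m - n - 0 + n - 1 = m - 1 := by ring
      rw [h2]
      have h3 : 0 ≤ (m - 1) / n := Int.ediv_nonneg (by omega) (by omega)
      omega
    · rw [if_neg h]
      have h4 : (m - 1) / n = 0 := Int.ediv_eq_zero_of_lt (by omega) (by omega)
      omega
  rw [hc, List.range_succ_eq_map]
  simp [List.map_map, Function.comp]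
  intro a _
  ring

lemma lsSlice_shift (rd : List Int) (nN : Nat) (i : Int) (hi : 0 ≤ i) :
    PySem.List.slice rd (some ((nN : Int) + i)) (some ((nN : Int) + i + (nN : Int))) =
      PySem.List.slice (rd.drop nN) (some i) (some (i + (nN : Int))) := by
  obtain ⟨a, rfl⟩ := Int.eq_ofNat_of_zero_le hi
  have h1 := PySem.List.slice_natCast rd (nN + a) (nN + a + nN)
  have h2 := PySem.List.slice_natCast (rd.drop nN) a (a + nN)
  push_cast at h1 h2
  rw [h1, h2, List.drop_drop]
  congr 1
  · omega

lemma lsPairs_split (rd : List Int) (pgi : List String) (h : pgi ≠ []) :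
    lsPairs rd pgi = List.zip pgi (rd.take pgi.length) ++ lsPairs (rd.drop pgi.length) pgi := by
  have hn : 0 < pgi.length := List.length_pos_of_ne_nil h
  set n := pgi.length with hndef
  set m := rd.length with hmdef
  set k := min n m with hkdef
  have hsplit : m = k + (m - k) := by omega
  unfold lsPairs
  rw [← hmdef, hsplit, List.range_add, List.map_append]
  congr 1
  · apply List.ext_getElem
    · simp [hkdef]; omega
    · intro j hj1 hj2
      simp only [List.getElem_map, List.getElem_range, List.getElem_zip, List.getElem_take]
      have hjk : j < k := by simpa [hkdef] using hj1
      have hjn : j < n := by omega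
      have hjm : j < m := by omega
      rw [Nat.mod_eq_of_lt hjn]
      congr 1
      · exact List.getD_eq_getElem pgi _ hjn
      · exact List.getD_eq_getElem rd _ hjm
  · rw [List.map_map]
    have hlen : (rd.drop n).length = m - n := by simp [hmdef]
    by_cases hmn : m ≤ n
    · have : m - k = 0 := by omega
      simp [this, hlen, show m - n = 0 by omega]
    · have hk : k = n := by omega
      rw [hlen, hk]
      apply List.map_congr_left
      intro j _
      simp only [Function.comp]
      congr 1
      · show pgi.getD ((n + j) % pgi.length) "" = pgi.getD (j % pgi.length) ""
        rw [← hndef, Nat.add_mod_left]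
      · simp [List.getD_eq_getElem?_getD, List.getElem?_drop]

lemma lsChunk_fold (pgi : List String) (h : pgi ≠ []) :
    ∀ (m : Nat) (rd : List Int), rd.length = m → ∀ d,
      (PySem.List.pyRange 0 (m : Int) (pgi.length : Int)).foldl
        (fun d i =>
          (List.zip pgi (PySem.List.slice rd (some i) (some (i + (pgi.length : Int))))).foldl
            lsStep d) d
      = (lsPairs rd pgi).foldl lsStep d := by
  intro m
  induction m using Nat.strong_induction_on with
  | _ m ih =>
    intro rd hlen d
    have hn : 0 < pgi.length := List.length_pos_of_ne_nil h
    rcases Nat.eq_zero_or_pos m with hm | hm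
    · subst hm
      have hrd : rd = [] := List.eq_nil_of_length_eq_zero hlen
      subst hrd
      rw [PySem.List.pyRange_of_pos _ _ (by exact_mod_cast hn)]
      simp [lsPairs]
    · rw [lsRange_cons _ _ (by exact_mod_cast hm) (by exact_mod_cast hn)]
      simp only [List.foldl_cons, List.foldl_map]
      have hhead : PySem.List.slice rd (some 0) (some (0 + (pgi.length : Int)))
          = rd.take pgi.length := by
        have h0 := PySem.List.slice_natCast rd 0 pgi.length
        simpa using h0
      rw [hhead, lsPairs_split rd pgi h, List.foldl_append]
      set d1 := (List.zip pgi (rd.take pgi.length)).foldl lsStep d with hd1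
      by_cases hmn : m ≤ pgi.length
      · have hneg : ¬ ((0:Int) < (m : Int) - (pgi.length : Int)) := by
          omega
        rw [PySem.List.pyRange_of_pos _ _ (by exact_mod_cast hn), if_neg hneg]
        have hdrop : rd.drop pgi.length = [] := by
          apply List.drop_eq_nil_of_le; omega
        simp [hdrop, lsPairs]
      · have hcong : ∀ (acc : PySem.Dict String (List Int)) (i : Int),
            i ∈ PySem.List.pyRange 0 ((m : Int) - (pgi.length : Int)) (pgi.length : Int) →
            (List.zip pgi (PySem.List.slice rd (some ((pgi.length : Int) + i))
                (some ((pgi.length : Int) + i + (pgi.length : Int))))).foldl lsStep acc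
            = (List.zip pgi (PySem.List.slice (rd.drop pgi.length) (some i)
                (some (i + (pgi.length : Int))))).foldl lsStep acc := by
          intro acc i hi
          have h0i : 0 ≤ i := by
            have := (PySem.List.mem_pyRange_iff_of_pos (by exact_mod_cast hn) i).mp hi
            omega
          rw [lsSlice_shift rd pgi.length i h0i]
        have hstep := PySem.List.foldl_congr_mem
          (l := PySem.List.pyRange 0 ((m : Int) - (pgi.length : Int)) (pgi.length : Int))
          (fun acc i =>
            (List.zip pgi (PySem.List.slice rd (some ((pgi.length : Int) + i))
                (some ((pgi.length : Int) + i + (pgi.length : Int))))).foldl lsStep acc)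
          (fun acc i =>
            (List.zip pgi (PySem.List.slice (rd.drop pgi.length) (some i)
                (some (i + (pgi.length : Int))))).foldl lsStep acc)
          d1 hcong
        have hcast : ((m : Int) - (pgi.length : Int)) = ((m - pgi.length : Nat) : Int) := by
          omega
        rw [hstep, hcast]
        exact ih (m - pgi.length) (by omega) (rd.drop pgi.length) (by simp [hlen]) d1

lemma lsGroup_fold : ∀ ps : List (String × Int),
    (ps.foldl lsStep PySem.Dict.empty).items = lsGrouped ps := by
  intro ps
  induction ps using List.reverseRecOn with
  | nil => simp [lsGrouped, PySem.Dict.empty]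
  | append_singleton ps p ih =>
    obtain ⟨k, v⟩ := p
    rw [List.foldl_append, List.foldl_cons, List.foldl_nil]
    set D := ps.foldl lsStep PySem.Dict.empty with hD
    set K := PySem.Set.ofList (ps.map Prod.fst) with hK
    have hitems : D.items
        = K.map (fun k' => (k', (ps.filter (fun p => p.1 == k')).map Prod.snd)) := ih
    have hkeys : D.keys = K := by
      rw [PySem.Dict.keys, hitems, List.map_map]
      conv_rhs => rw [← List.map_id K]
      exact List.map_congr_left (fun x _ => rfl)
    have hcontP : D.contains k = true ↔ k ∈ K := by
      rw [PySem.Dict.contains_iff_mem_keys, hkeys]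
    have hgroup : lsGrouped (ps ++ [(k, v)])
        = (PySem.Set.add K k).map (fun k' =>
            (k', (ps.filter (fun p => p.1 == k')).map Prod.snd
                  ++ (if k == k' then [v] else []))) := by
      unfold lsGrouped
      rw [List.map_append, List.map_singleton, PySem.Set.ofList_append_singleton, ← hK]
      apply List.map_congr_left
      intro k' _
      rw [List.filter_append, List.map_append]
      congr 2
      by_cases hkk : k = k'
      · subst hkk; simp
      · simp [hkk]
    show ((if D.contains (k, v).1 then D else D.insert (k, v).1 []).modify (k, v).1 []
        (fun l => l ++ [(k, v).2])).items = _
    by_cases hkK : k ∈ K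
    · have hc : D.contains (k, v).1 = true := hcontP.mpr hkK
      rw [if_pos hc, PySem.Dict.modify]
      have hgd : D.getD k [] = (ps.filter (fun p => p.1 == k)).map Prod.snd := by
        apply PySem.Dict.getD_of_get?_eq_some
        apply PySem.Dict.get?_of_mem_items
        · rw [hitems]; exact List.mem_map_of_mem hkK
        · rw [hkeys, hK]; exact PySem.Set.nodup_ofList _
      rw [PySem.Dict.items_insert_of_contains _ _ hc, hitems, List.map_map, hgroup,
        PySem.Set.add_of_mem hkK]
      apply List.map_congr_left
      intro k' _
      simp only [Function.comp]
      by_cases hkk : k' = k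
      · subst hkk
        simp [hgd]
      · have h1 : (k' == k) = false := by simpa using hkk
        have h2 : (k == k') = false := by simpa using fun h => hkk (by simp [h])
        simp [h1, h2]
    · have hc : D.contains (k, v).1 = false := by
        rw [← Bool.not_eq_true]; exact fun h => hkK (hcontP.mp h)
      rw [if_neg (by simp [hc]), PySem.Dict.modify, PySem.Dict.getD_insert_self]
      have hc1 : (D.insert (k, v).1 []).contains (k, v).1 = true :=
        PySem.Dict.contains_insert_self _ _ _
      rw [PySem.Dict.items_insert_of_contains _ _ hc1,
        PySem.Dict.items_insert_of_not_contains _ _ hc, hitems, hgroup,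
        PySem.Set.add_of_not_mem hkK, List.map_append, List.map_append, List.map_map]
      congr 1
      · apply List.map_congr_left
        intro k' hk'
        have hkk : k' ≠ k := fun hh => hkK (hh ▸ hk')
        have h1 : (k' == k) = false := by simpa using hkk
        have h2 : (k == k') = false := by simpa using fun hh => hkk (by simp [hh])
        simp [Function.comp, h1, h2]
      · have hnil : ps.filter (fun p => p.1 == k) = [] := by
          rw [List.filter_eq_nil_iff]
          intro p hp hpk
          apply hkK
          rw [hK, PySem.Set.mem_ofList]
          have hp1 : p.1 = k := by simpa using hpk
          exact hp1 ▸ List.mem_map_of_mem (f := Prod.fst) hp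
        simp [hnil]

lemma ls_to_dic_eq (rd : List Int) (pgi : List String) (h : pgi ≠ []) :
    ls_to_dic rd pgi = ((lsPairs rd pgi).foldl lsStep PySem.Dict.empty).items := by
  show ((PySem.List.pyRange 0 ((rd.length : Int)) ((pgi.length : Int))).foldl
      (fun d i =>
        (List.zip pgi (PySem.List.slice rd (some i) (some (i + (pgi.length : Int))))).foldl
          lsStep d) PySem.Dict.empty).items = _
  rw [lsChunk_fold pgi h rd.length rd rfl PySem.Dict.empty]

-- The single append step of B's fill pass.
def lsApp (d : PySem.Dict String (List Int)) (kv : String × Int) : PySem.Dict String (List Int) :=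
  d.modify kv.1 [] (fun l => l ++ [kv.2])

-- Preallocation {k: [] for k in ks} as a dict literal.
lemma lsPrealloc : ∀ (ks : List String), ks.Nodup →
    (ks.foldl (fun d k => d.insert k []) PySem.Dict.empty)
      = PySem.Dict.mk (ks.map (fun k => (k, ([] : List Int)))) := by
  intro ks
  induction ks using List.reverseRecOn with
  | nil => intro _; rfl
  | append_singleton ks k ih =>
    intro hnd
    have hnd' : ks.Nodup := (List.nodup_append.mp hnd).1
    have hkn : k ∉ ks := by
      simpa using List.disjoint_of_nodup_append hnd
    rw [List.foldl_append, List.foldl_cons, List.foldl_nil, ih hnd']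
    have hc : (PySem.Dict.mk (ks.map (fun k => (k, ([] : List Int))))).contains k = false := by
      rw [← Bool.not_eq_true, PySem.Dict.contains_iff_mem_keys]
      intro hmem
      apply hkn
      rw [PySem.Dict.keys, List.map_map] at hmem
      simpa using hmem
    have := PySem.Dict.items_insert_of_not_contains
      (PySem.Dict.mk (ks.map (fun k => (k, ([] : List Int))))) ([] : List Int) hc
    rw [List.map_append]
    exact congrArg PySem.Dict.mk this

-- Filling a preallocated dict in one flat pass groups the pairs by key.
lemma lsFill : ∀ (qs : List (String × Int)) (K : List String) (w : String → List Int),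
    K.Nodup → (∀ p ∈ qs, p.1 ∈ K) →
    (qs.foldl lsApp (PySem.Dict.mk (K.map (fun k => (k, w k))))).items
      = K.map (fun k => (k, w k ++ (qs.filter (fun p => p.1 == k)).map Prod.snd)) := by
  intro qs
  induction qs using List.reverseRecOn with
  | nil => intro K w _ _; simp
  | append_singleton qs p ih =>
    intro K w hnd hq
    obtain ⟨k, v⟩ := p
    have hk : k ∈ K := hq (k, v) (List.mem_append_right _ (List.mem_singleton_self _))
    have hq' : ∀ p ∈ qs, p.1 ∈ K := fun p hp => hq p (List.mem_append_left _ hp)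
    rw [List.foldl_append, List.foldl_cons, List.foldl_nil]
    set D := qs.foldl lsApp (PySem.Dict.mk (K.map (fun k => (k, w k)))) with hD
    have hitems : D.items
        = K.map (fun k' => (k', w k' ++ (qs.filter (fun p => p.1 == k')).map Prod.snd)) :=
      ih K w hnd hq'
    have hkeys : D.keys = K := by
      rw [PySem.Dict.keys, hitems, List.map_map]
      conv_rhs => rw [← List.map_id K]
      exact List.map_congr_left (fun x _ => rfl)
    have hc : D.contains (k, v).1 = true := by
      rw [PySem.Dict.contains_iff_mem_keys, hkeys]; exact hk
    have hgd : D.getD k [] = w k ++ (qs.filter (fun p => p.1 == k)).map Prod.snd := by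
      apply PySem.Dict.getD_of_get?_eq_some
      apply PySem.Dict.get?_of_mem_items
      · rw [hitems]; exact List.mem_map_of_mem hk
      · rw [hkeys]; exact hnd
    show ((D.modify (k, v).1 [] (fun l => l ++ [(k, v).2]))).items = _
    rw [PySem.Dict.modify, PySem.Dict.items_insert_of_contains _ _ hc, hitems, List.map_map]
    apply List.map_congr_left
    intro k' _
    simp only [Function.comp]
    by_cases hkk : k' = k
    · subst hkk
      simp [hgd]
    · have h1 : (k' == k) = false := by simpa using hkk
      have h2 : (k == k') = false := by simpa using fun hh => hkk (by simp [hh])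
      simp [h1, h2]

-- The keys that occur in the flat sequence are exactly the first len(receivedata) port names.
lemma lsKeys (rd : List Int) (pgi : List String) (h : pgi ≠ []) :
    PySem.Set.ofList ((lsPairs rd pgi).map Prod.fst)
      = PySem.Set.ofList (pgi.take rd.length) := by
  have hn : 0 < pgi.length := List.length_pos_of_ne_nil h
  set n := pgi.length with hndef
  set m := rd.length with hmdef
  have hmap : (lsPairs rd pgi).map Prod.fst
      = (List.range m).map (fun j => pgi.getD (j % n) "") := by
    unfold lsPairs
    rw [List.map_map]
    rfl
  rw [hmap]
  by_cases hmn : m ≤ n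
  · congr 1
    apply List.ext_getElem
    · simp; omega
    · intro j hj1 hj2
      simp only [List.getElem_map, List.getElem_range, List.getElem_take]
      have hjn : j < n := by simp at hj1; omega
      rw [Nat.mod_eq_of_lt hjn]
      exact List.getD_eq_getElem pgi _ hjn
  · rw [List.take_of_length_le (by omega : pgi.length ≤ m)]
    have hsplit : m = n + (m - n) := by omega
    rw [hsplit, List.range_add, List.map_append]
    have hfst : (List.range n).map (fun j => pgi.getD (j % n) "") = pgi := by
      apply List.ext_getElem
      · simp [hndef]
      · intro j hj1 hj2
        simp only [List.getElem_map, List.getElem_range]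
        have hjn : j < n := by simpa using hj1
        rw [Nat.mod_eq_of_lt hjn]
        exact List.getD_eq_getElem pgi _ hjn
    rw [hfst, PySem.Set.ofList_append, PySem.Set.update_eq_append_filter]
    have hnil : ((PySem.Set.ofList (((List.range (m - n)).map (fun x => n + x)).map
          (fun j => pgi.getD (j % n) ""))).filter
          (fun y => !(PySem.Set.contains (PySem.Set.ofList pgi) y))) = [] := by
      rw [List.filter_eq_nil_iff]
      intro y hy
      have hy' : y ∈ ((List.range (m - n)).map (fun x => n + x)).map
          (fun j => pgi.getD (j % n) "") := by
        rw [← PySem.Set.mem_ofList (xs := ((List.range (m - n)).map (fun x => n + x)).map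
          (fun j => pgi.getD (j % n) ""))]
        exact hy
      have hmem : y ∈ pgi := by
        rcases List.mem_map.mp hy' with ⟨i, hi, rfl⟩
        rcases List.mem_map.mp hi with ⟨j, hj, rfl⟩
        rw [Nat.add_mod_left]
        have hlt : j % n < n := Nat.mod_lt _ hn
        rw [List.getD_eq_getElem pgi _ hlt]
        exact List.getElem_mem _
      simp [hmem]
    rw [hnil, List.append_nil]

lemma ls_to_dic_alt_eq (rd : List Int) (pgi : List String) (h : pgi ≠ []) :
    ls_to_dic_alt rd pgi = lsGrouped (lsPairs rd pgi) := by
  unfold ls_to_dic_alt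
  show ((PySem.List.enumerate rd).foldl
      (fun d p =>
        d.modify (PySem.List.pyGetD pgi (PySem.Int.mod p.1 (PySem.List.len pgi)) "")
          [] (fun l => l ++ [p.2]))
      ((PySem.List.dedup (PySem.List.slice pgi none (some (PySem.List.len rd)))).foldl
        (fun d k => d.insert k []) PySem.Dict.empty)).items
    = lsGrouped (lsPairs rd pgi)
  set K := PySem.Set.ofList ((lsPairs rd pgi).map Prod.fst) with hK
  have hdedup : PySem.List.dedup
        (PySem.List.slice pgi none (some (PySem.List.len rd))) = K := by
    rw [PySem.List.slice_to pgi (by simp [PySem.List.len_eq] : (0:Int) ≤ PySem.List.len rd)]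
    rw [hK, lsKeys rd pgi h]
    simp [PySem.List.len_eq]
  rw [hdedup, lsPrealloc K (hK ▸ PySem.Set.nodup_ofList _)]
  have hfold :
      (PySem.List.enumerate rd).foldl
        (fun d p =>
          d.modify (PySem.List.pyGetD pgi (PySem.Int.mod p.1 (PySem.List.len pgi)) "")
            [] (fun l => l ++ [p.2]))
        (PySem.Dict.mk (K.map (fun k => (k, ([] : List Int)))))
      = (lsPairs rd pgi).foldl lsApp
        (PySem.Dict.mk (K.map (fun k => (k, ([] : List Int))))) := by
    rw [PySem.List.enumerate_eq_map_pyRange rd 0]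
    rw [show PySem.List.len rd = ((rd.length : Nat) : Int) from PySem.List.len_eq rd,
      PySem.List.pyRange_zero_nat]
    unfold lsPairs
    simp only [List.foldl_map]
    apply PySem.List.foldl_congr_mem
    intro acc x _hx
    show acc.modify (PySem.List.pyGetD pgi
        (PySem.Int.mod ((x : Nat) : Int) (PySem.List.len pgi)) "") [] _ = _
    rw [show PySem.List.len pgi = ((pgi.length : Nat) : Int) from PySem.List.len_eq pgi,
      PySem.Int.mod_natCast, PySem.List.pyGetD_natCast, PySem.List.pyGetD_natCast]
    rfl
  rw [hfold, lsFill (lsPairs rd pgi) K (fun _ => []) (hK ▸ PySem.Set.nodup_ofList _)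
    (fun p hp => by rw [hK, PySem.Set.mem_ofList]; exact List.mem_map_of_mem hp)]
  unfold lsGrouped
  rw [← hK]
  apply List.map_congr_left
  intro k _
  simp

-- ===== VERDICT (by name: the statement is the Claim_ definition above) =====
theorem ls_to_dic_spec : Claim_equal_ls_to_dic := by
  intro rd pgi _ hpre
  unfold Spec_ls_to_dic
  rw [ls_to_dic_eq rd pgi hpre, ls_to_dic_alt_eq rd pgi hpre, lsGroup_fold]
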